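-- pv_equiv track=rewrite | github.com/915dbfl/youlAlgorithm | Programmers/level2/n^2.py | solution
-- ===== SOURCE A (Python) =====
-- def solution(n, left, right):
--     answer = []
--     num = (left+1)%n if (left+1)%n != 0 else n
--     round = left//n+1
--     for _ in range(right-left+1):
--         if round > num:
--             answer.append(round)
--         else:
--             answer.append(num)
--         if num == n:
--             round+=1
--         num = num+1 if num != n else 1
--
--     return answer
-- ===== SOURCE B (Python) =====
-- def solution(n, left, right):
--     return [max(i // n, i % n) + 1 for i in range(left, right + 1)]
-- ===== Notes on version B (the rewrite author's own statement) =====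
-- stated objective: simpler
-- what changed: B drops A's incremental counters (num, round) and branch-based state machine and computes each element directly from its flattened index as max(i//n, i%n)+1.
-- outside the precondition, e.g. on solution(-2, 0, 3): A returns [1, 1, 1, 2], B returns [1, 0, 1, 0]; on solution(0, 0, 3): A raises ZeroDivisionError, B raises ZeroDivisionError
import Mathlib
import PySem

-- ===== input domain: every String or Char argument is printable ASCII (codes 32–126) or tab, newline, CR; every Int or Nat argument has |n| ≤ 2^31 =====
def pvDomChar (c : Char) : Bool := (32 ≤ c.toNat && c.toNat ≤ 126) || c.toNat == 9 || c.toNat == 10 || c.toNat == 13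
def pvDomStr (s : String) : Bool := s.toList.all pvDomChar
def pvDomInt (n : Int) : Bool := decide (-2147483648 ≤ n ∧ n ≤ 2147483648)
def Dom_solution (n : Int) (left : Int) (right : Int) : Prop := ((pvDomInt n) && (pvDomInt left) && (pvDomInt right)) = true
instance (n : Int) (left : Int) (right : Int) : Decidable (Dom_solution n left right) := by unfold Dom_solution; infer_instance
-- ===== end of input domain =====

-- B replaces A's incremental (num, round) counter state machine by the direct per-index
-- formula max(i//n, i%n)+1; same cost, no maintained state (objective: simpler).

-- ===== PORT A =====
-- literal transliteration of A's loop: state (answer, num, round), branches in source order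
def solutionLoop (n : Int) : Nat → List Int → Int → Int → List Int
  | 0, answer, _, _ => answer
  | k+1, answer, num, round =>
    solutionLoop n k
      (answer ++ [if round > num then round else num])
      (if num ≠ n then num + 1 else 1)
      (if num = n then round + 1 else round)

def solution (n : Int) (left : Int) (right : Int) : List Int :=
  let num := if PySem.Int.mod (left+1) n ≠ 0 then PySem.Int.mod (left+1) n else n
  let round := PySem.Int.floordiv left n + 1
  solutionLoop n (right - left + 1).toNat [] num round

-- ===== PORT B =====
def solution_alt (n : Int) (left : Int) (right : Int) : List Int :=
  (PySem.List.pyRange left (right + 1) 1).map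
    (fun i => max (PySem.Int.floordiv i n) (PySem.Int.mod i n) + 1)

-- ===== PRECONDITION & SPEC =====
-- Pre_ excludes n ≤ 0: n = 0 raises ZeroDivisionError in A, and a negative n is outside the
-- natural domain (a matrix size); there A's counter state machine returns values that are an
-- artefact of its implementation and B's index formula differs.
def Pre_solution (n : Int) (left : Int) (right : Int) : Prop := 1 ≤ n
instance (n : Int) (left : Int) (right : Int) : Decidable (Pre_solution n left right) := by unfold Pre_solution; infer_instance
def pvWitness_solution : Int × Int × Int := (3, 2, 7)

def Spec_solution (n : Int) (left : Int) (right : Int) (out : List Int) : Prop := out = solution_alt n left right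
instance (n : Int) (left : Int) (right : Int) (out : List Int) : Decidable (Spec_solution n left right out) := by unfold Spec_solution; infer_instance

-- ===== CLAIM (what is proved, stated in full; the proofs are below) =====
def Claim_equal_solution : Prop := ∀ (n : Int) (left : Int) (right : Int), Dom_solution n left right → Pre_solution n left right → Spec_solution n left right (solution n left right)

-- ===== LEMMAS AND PROOFS =====

-- one step of the counters advances the flattened index by one (n > 0)
lemma succ_mod_div (n i : Int) (hn : 0 < n) :
    (i + 1) % n = (if i % n = n - 1 then 0 else i % n + 1) ∧
    (i + 1) / n = (if i % n = n - 1 then i / n + 1 else i / n) := by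
  have hq := Int.ediv_add_emod i n
  have hr0 := Int.emod_nonneg i (by omega : n ≠ 0)
  have hrn := Int.emod_lt_of_pos i hn
  have hi : i + 1 = (i % n + 1) + n * (i / n) := by omega
  by_cases hcase : i % n = n - 1
  · rw [hi, hcase]
    have h1 : (n - 1 + 1 : Int) = n := by ring
    rw [h1]
    constructor
    · rw [Int.add_mul_emod_self_left, Int.emod_self]
      simp
    · rw [Int.add_mul_ediv_left _ _ (by omega : n ≠ 0),
        Int.ediv_self (by omega : (n:Int) ≠ 0)]
      simp; ring
  · rw [hi]
    constructor
    · rw [Int.add_mul_emod_self_left, Int.emod_eq_of_lt (by omega) (by omega)]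
      simp [hcase]
    · rw [Int.add_mul_ediv_left _ _ (by omega : n ≠ 0),
        Int.ediv_eq_zero_of_lt (by omega) (by omega)]
      simp [hcase]

-- the loop, started at the state encoding flattened index i, produces the mapped range
lemma loop_eq (n : Int) (hn : 1 ≤ n) :
    ∀ (k : Nat) (i : Int) (acc : List Int),
      solutionLoop n k acc (i % n + 1) (i / n + 1)
        = acc ++ (PySem.List.pyRange i (i + k) 1).map (fun j => max (j / n) (j % n) + 1) := by
  intro k
  induction k with
  | zero =>
    intro i acc
    simp [solutionLoop, PySem.List.pyRange_one_eq_nil (le_refl i)]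
  | succ k ih =>
    intro i acc
    have hr0 := Int.emod_nonneg i (by omega : n ≠ 0)
    have hrn := Int.emod_lt_of_pos i (show (0:Int) < n by omega)
    obtain ⟨hm, hd⟩ := succ_mod_div n i (by omega)
    have hv : (if i / n + 1 > i % n + 1 then i / n + 1 else i % n + 1)
        = max (i / n) (i % n) + 1 := by
      split_ifs with h <;> omega
    have hnum : (if i % n + 1 ≠ n then i % n + 1 + 1 else 1) = (i + 1) % n + 1 := by
      rw [hm]; split_ifs with h1 h2 <;> omega
    have hround : (if i % n + 1 = n then i / n + 1 + 1 else i / n + 1) = (i + 1) / n + 1 := by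
      rw [hd]; split_ifs with h1 h2 <;> omega
    have hrange : PySem.List.pyRange i (i + (k+1 : Nat)) 1
        = i :: PySem.List.pyRange (i+1) (i + 1 + k) 1 := by
      rw [PySem.List.pyRange_one_cons (by push_cast; omega)]
      congr 1
      push_cast; ring_nf
    rw [solutionLoop, hv, hnum, hround, ih (i+1) (acc ++ [max (i / n) (i % n) + 1]), hrange]
    simp

-- the initial state of A encodes flattened index 'left'
lemma init_num (n l : Int) (hn : 1 ≤ n) :
    (if (l + 1) % n ≠ 0 then (l + 1) % n else n) = l % n + 1 := by
  have hr0 := Int.emod_nonneg l (by omega : n ≠ 0)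
  have hrn := Int.emod_lt_of_pos l (show (0:Int) < n by omega)
  obtain ⟨hm, _⟩ := succ_mod_div n l (by omega)
  rw [hm]
  split_ifs with h1 h2 h3 <;> omega

-- ===== VERDICT (by name: the statement is the Claim_ definition above) =====
theorem solution_spec : Claim_equal_solution := by
  intro n left right _ hn
  have hn1 : 1 ≤ n := hn
  unfold Spec_solution solution solution_alt
  have hmod : ∀ a b : Int, 0 < b → PySem.Int.mod a b = a % b := fun a b h => PySem.Int.mod_eq_emod_of_pos h
  have hdiv : ∀ a b : Int, 0 < b → PySem.Int.floordiv a b = a / b := fun a b h => PySem.Int.floordiv_eq_ediv_of_pos h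
  have hfun : (fun i => max (PySem.Int.floordiv i n) (PySem.Int.mod i n) + 1)
      = fun j => max (j / n) (j % n) + 1 := by
    funext j; rw [hmod j n (by omega), hdiv j n (by omega)]
  rw [hfun, hmod (left+1) n (by omega), hdiv left n (by omega), init_num n left hn1,
    loop_eq n hn1 ((right - left + 1).toNat) left []]
  have hends : PySem.List.pyRange left (left + ((right - left + 1).toNat : Int)) 1
      = PySem.List.pyRange left (right + 1) 1 := by
    rcases le_or_gt left (right + 1) with h | h
    · congr 1; omega
    · rw [PySem.List.pyRange_one_eq_nil (by omega), PySem.List.pyRange_one_eq_nil (by omega)]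
  rw [hends]
  simp
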